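-- pv_equiv track=rewrite | github.com/slapexs/final_project | cosine_similarity.py | create_word_in_table
-- ===== SOURCE A (Python) =====
-- def create_word_in_table(keyword, columns):
--     temp = []
--     for i in range(len(keyword)):
--         for k in range(len(columns)):
--             if keyword[i] == columns[k]:
--                 temp.append(int(k))
--     # Create table
--     table = [0 for zero in range(len(columns))]
--     for i in temp:
--         table[i] = 1
--     return table
-- ===== SOURCE B (Python) =====
-- def create_word_in_table(keyword, columns):
--     seen = set(keyword)
--     return [1 if c in seen else 0 for c in columns]
-- ===== Notes on version B (the rewrite author's own statement) =====
-- stated objective: faster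
-- what changed: Replaces A's nested keyword-by-columns index scan plus a separate marking pass over a zero table with a set of keyword values built once and a single comprehension over columns emitting 1/0 directly.
import Mathlib
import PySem

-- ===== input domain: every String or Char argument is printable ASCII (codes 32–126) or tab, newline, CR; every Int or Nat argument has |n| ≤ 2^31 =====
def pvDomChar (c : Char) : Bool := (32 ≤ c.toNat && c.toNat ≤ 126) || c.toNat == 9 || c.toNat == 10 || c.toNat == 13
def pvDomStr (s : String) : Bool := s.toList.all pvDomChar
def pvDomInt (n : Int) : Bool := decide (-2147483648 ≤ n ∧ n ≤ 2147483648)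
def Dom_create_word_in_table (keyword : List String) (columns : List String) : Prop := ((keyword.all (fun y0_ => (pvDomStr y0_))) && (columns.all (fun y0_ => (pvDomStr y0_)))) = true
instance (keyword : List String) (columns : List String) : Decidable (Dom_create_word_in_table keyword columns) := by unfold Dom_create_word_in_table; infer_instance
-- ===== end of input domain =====

-- B builds the set of keyword values once and emits 1/0 in a single pass over columns,
-- replacing A's nested keyword×columns index scan plus separate marking pass.


-- ===== PORT A =====
def create_word_in_table (keyword : List String) (columns : List String) : List Int :=
  -- temp = []; for i in range(len(keyword)): for k in range(len(columns)): if keyword[i]==columns[k]: temp.append(int(k))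
  let temp : List Int :=
    (PySem.List.pyRange 0 (keyword.length : Int) 1).foldl (fun temp i =>
      (PySem.List.pyRange 0 (columns.length : Int) 1).foldl (fun temp k =>
        if PySem.List.pyGetD keyword i "" == PySem.List.pyGetD columns k "" then
          temp ++ [k]
        else temp) temp) []
  -- table = [0 for zero in range(len(columns))]
  let table : List Int :=
    (PySem.List.pyRange 0 (columns.length : Int) 1).map (fun _ => (0 : Int))
  -- for i in temp: table[i] = 1   (every i in temp is a valid nonnegative index, so pySetD is exact)
  temp.foldl (fun table i => PySem.List.pySetD table i 1) table

-- ===== PORT B =====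
def create_word_in_table_alt (keyword : List String) (columns : List String) : List Int :=
  let seen : PySem.Set String := PySem.Set.ofList keyword
  columns.map (fun c => if PySem.Set.contains seen c then (1 : Int) else 0)

-- ===== PRECONDITION & SPEC =====
def Spec_create_word_in_table (keyword : List String) (columns : List String) (out : List Int) : Prop := out = create_word_in_table_alt keyword columns
instance (keyword : List String) (columns : List String) (out : List Int) : Decidable (Spec_create_word_in_table keyword columns out) := by unfold Spec_create_word_in_table; infer_instance

-- ===== CLAIM (what is proved, stated in full; the proofs are below) =====
def Claim_equal_create_word_in_table : Prop := ∀ (keyword : List String) (columns : List String), Dom_create_word_in_table keyword columns → Spec_create_word_in_table keyword columns (create_word_in_table keyword columns)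

-- ===== LEMMAS AND PROOFS =====

-- the marking loop preserves the table's length
lemma length_foldl_set1 (L : List Int) (t : List Int) :
    (L.foldl (fun tb i => PySem.List.pySetD tb i 1) t).length = t.length := by
  induction L generalizing t with
  | nil => rfl
  | cons i L ih => simp [List.foldl_cons, ih, PySem.List.length_pySetD]

-- elementwise reading of the marking loop: position j holds 1 iff j occurs in L
lemma foldl_set1_getElem? (L : List Int) (t : List Int) (j : Nat)
    (hL : ∀ i ∈ L, 0 ≤ i) (hj : j < t.length) :
    (L.foldl (fun tb i => PySem.List.pySetD tb i 1) t)[j]? =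
      if (j : Int) ∈ L then some 1 else t[j]? := by
  induction L generalizing t with
  | nil => simp
  | cons i L ih =>
    have hi : 0 ≤ i := hL i (by simp)
    have hset : PySem.List.pySetD t i 1 = t.set i.toNat 1 :=
      PySem.List.pySetD_of_nonneg t 1 hi
    have hlen : j < (PySem.List.pySetD t i 1).length := by
      simpa [PySem.List.length_pySetD] using hj
    rw [List.foldl_cons, ih _ (fun x hx => hL x (by simp [hx])) hlen]
    rw [hset]
    by_cases hjL : (j : Int) ∈ L
    · simp [hjL, List.mem_cons]
    · by_cases hij : (j : Int) = i
      · have hti : i.toNat = j := by omega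
        rw [hti]
        simp [hij, List.mem_cons, hj]
      · have hne : i.toNat ≠ j := by omega
        simp [hjL, hij, List.mem_cons, List.getElem?_set_ne hne]

-- every index appended to temp is a valid column index
lemma temp_mem_bounds (keyword columns : List String) (x : Int)
    (hx : x ∈ (PySem.List.pyRange 0 (keyword.length : Int) 1).flatMap (fun i =>
        (PySem.List.pyRange 0 (columns.length : Int) 1).filter (fun k =>
          PySem.List.pyGetD keyword i "" == PySem.List.pyGetD columns k ""))) :
    0 ≤ x ∧ x < (columns.length : Int) := by
  simp only [List.mem_flatMap, List.mem_filter] at hx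
  obtain ⟨i, _, hxr, _⟩ := hx
  exact (PySem.List.mem_pyRange_one).1 hxr

-- j occurs in temp iff columns[j] occurs in keyword
lemma mem_temp_iff (keyword columns : List String) (j : Nat) (hj : j < columns.length) :
    ((j : Int) ∈ (PySem.List.pyRange 0 (keyword.length : Int) 1).flatMap (fun i =>
        (PySem.List.pyRange 0 (columns.length : Int) 1).filter (fun k =>
          PySem.List.pyGetD keyword i "" == PySem.List.pyGetD columns k ""))) ↔
      columns[j] ∈ keyword := by
  simp only [List.mem_flatMap, List.mem_filter, PySem.List.mem_pyRange_one, beq_iff_eq]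
  constructor
  · rintro ⟨i, ⟨h0, hik⟩, -, heq⟩
    have hgi : PySem.List.pyGetD keyword i "" = keyword[i.toNat] :=
      PySem.List.pyGetD_eq_getElem keyword "" h0 hik
    have hgj : PySem.List.pyGetD columns (j : Int) "" = columns[j] := by
      simpa using PySem.List.pyGetD_eq_getElem columns (d := "") (i := (j : Int))
        (by omega) (by exact_mod_cast hj)
    rw [hgi, hgj] at heq
    exact heq ▸ List.getElem_mem _
  · intro hmem
    obtain ⟨n, hn, hEq⟩ := List.mem_iff_getElem.1 hmem
    refine ⟨(n : Int), ⟨by omega, by exact_mod_cast hn⟩, ⟨by omega, by exact_mod_cast hj⟩, ?_⟩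
    have hgi : PySem.List.pyGetD keyword (n : Int) "" = keyword[n] := by
      simpa using PySem.List.pyGetD_eq_getElem keyword (d := "") (i := (n : Int))
        (by omega) (by exact_mod_cast hn)
    have hgj : PySem.List.pyGetD columns (j : Int) "" = columns[j] := by
      simpa using PySem.List.pyGetD_eq_getElem columns (d := "") (i := (j : Int))
        (by omega) (by exact_mod_cast hj)
    rw [hgi, hgj, hEq]

-- ===== VERDICT (by name: the statement is the Claim_ definition above) =====
theorem create_word_in_table_spec : Claim_equal_create_word_in_table := by
  intro keyword columns _
  unfold Spec_create_word_in_table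
  simp only [create_word_in_table, create_word_in_table_alt]
  -- name temp's closed form
  rw [show
      (PySem.List.pyRange 0 (keyword.length : Int) 1).foldl (fun temp i =>
        (PySem.List.pyRange 0 (columns.length : Int) 1).foldl (fun temp k =>
          if PySem.List.pyGetD keyword i "" == PySem.List.pyGetD columns k "" then
            temp ++ [k]
          else temp) temp) [] =
      (PySem.List.pyRange 0 (keyword.length : Int) 1).flatMap (fun i =>
        (PySem.List.pyRange 0 (columns.length : Int) 1).filter (fun k =>
          PySem.List.pyGetD keyword i "" == PySem.List.pyGetD columns k ""))
    from by
      simp only [PySem.List.foldl_append_if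
        (f := fun k => k)]
      rw [PySem.List.foldl_append_eq_flatMap]
      simp]
  set temp := (PySem.List.pyRange 0 (keyword.length : Int) 1).flatMap (fun i =>
      (PySem.List.pyRange 0 (columns.length : Int) 1).filter (fun k =>
        PySem.List.pyGetD keyword i "" == PySem.List.pyGetD columns k "")) with htemp
  set t0 := (PySem.List.pyRange 0 (columns.length : Int) 1).map (fun _ => (0 : Int)) with ht0
  have hlen0 : t0.length = columns.length := by
    simp [ht0, PySem.List.length_pyRange_one]
  apply List.ext_getElem?
  intro j
  have hlenA : (temp.foldl (fun tb i => PySem.List.pySetD tb i 1) t0).length = columns.length := by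
    rw [length_foldl_set1, hlen0]
  by_cases hj : j < columns.length
  · have hread := foldl_set1_getElem? temp t0 j
      (fun i hi => (temp_mem_bounds keyword columns i (htemp ▸ hi)).1) (by omega)
    rw [hread]
    have hmem : ((j : Int) ∈ temp) ↔ columns[j] ∈ keyword := by
      rw [htemp]; exact mem_temp_iff keyword columns j hj
    have hB : (columns.map (fun c => if PySem.Set.contains (PySem.Set.ofList keyword) c then (1 : Int) else 0))[j]? =
        some (if columns[j] ∈ keyword then 1 else 0) := by
      rw [List.getElem?_map, List.getElem?_eq_getElem hj]
      simp only [Option.map_some]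
      congr 1
      by_cases h : columns[j] ∈ keyword
      · simp [h]
      · simp [h]
    rw [hB]
    by_cases h : columns[j] ∈ keyword
    · rw [if_pos (hmem.2 h), if_pos h]
    · have hnot : ¬ ((j : Int) ∈ temp) := fun hc => h (hmem.1 hc)
      have ht0j : t0[j]? = some 0 := by
        rw [ht0, List.getElem?_map, List.getElem?_eq_getElem (by simpa [PySem.List.length_pyRange_one] using hj)]
        simp
      rw [if_neg hnot, if_neg h, ht0j]
  · rw [List.getElem?_eq_none (by omega), List.getElem?_eq_none (by simp; omega)]
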